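-- pv_equiv track=rewrite | github.com/megu-a1/type- | Search.py | serch_index
-- ===== SOURCE A (Python) =====
-- def serch_index(sorted_array, target_number):
--
--     # ここから記述
--     # 初めの処理を判断するための変数
--     i = 0
--     while True:
--         # 初期化処理
--         if i == 0:
--             # 探索対象の配列を設定
--             search_array = sorted_array
--             # 元々の探索対象である全ての要素を含んだ配列のインデックスを保持
--             search_idx = [num for num in range(0,len(sorted_array))]
--
--         # 最後の要素まで探し切った場合はループから抜け-1を返す
--         if not search_array:
--             break
--
--         # 中間の値のインデックスを保持
--         middle_idx = int(len(search_array)/2)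
--
--         # 中間の値と探したい値が一致した場合はそのインデックスを返す
--         if search_array[middle_idx] == target_number:
--             return search_idx[middle_idx]
--
--         # 中間の値の方が探したい値よりも大きい場合は中間の値より小さい部分を探索対象にする
--         # 元々の対象である全ての要素を含んだ配列のインデックスも絞る
--         if search_array[middle_idx] > target_number:
--             search_array = search_array[:middle_idx]
--             search_idx = search_idx[:middle_idx]
--         # 中間の値の方が探したい値よりも小さい場合は中間の値より大きい部分を探索対象にする
--         # 元々の対象である全ての要素を含んだ配列のインデックスも絞る
--         else:
--             search_array = search_array[middle_idx+1:]
--             search_idx = search_idx[middle_idx+1:]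
--
--         i+=1
--
--
--
--     # ここまで記述
--
--     # 探索対象が存在しない場合、-1を返却
--     return -1
-- ===== SOURCE B (Python) =====
-- def serch_index(sorted_array, target_number):
--     # pointer-based binary search: no slicing, no index bookkeeping list
--     lo, hi = 0, len(sorted_array)
--     while lo < hi:
--         mid = (lo + hi) // 2
--         v = sorted_array[mid]
--         if v == target_number:
--             return mid
--         if v > target_number:
--             hi = mid
--         else:
--             lo = mid + 1
--     return -1
-- ===== Notes on version B (the rewrite author's own statement) =====
-- stated objective: faster
-- what changed: Replaces A's repeated slicing of both the value array and an auxiliary index list with a two-pointer lo/hi binary search over the original array (same midpoint, so identical probe sequence and identical result).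
import Mathlib
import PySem

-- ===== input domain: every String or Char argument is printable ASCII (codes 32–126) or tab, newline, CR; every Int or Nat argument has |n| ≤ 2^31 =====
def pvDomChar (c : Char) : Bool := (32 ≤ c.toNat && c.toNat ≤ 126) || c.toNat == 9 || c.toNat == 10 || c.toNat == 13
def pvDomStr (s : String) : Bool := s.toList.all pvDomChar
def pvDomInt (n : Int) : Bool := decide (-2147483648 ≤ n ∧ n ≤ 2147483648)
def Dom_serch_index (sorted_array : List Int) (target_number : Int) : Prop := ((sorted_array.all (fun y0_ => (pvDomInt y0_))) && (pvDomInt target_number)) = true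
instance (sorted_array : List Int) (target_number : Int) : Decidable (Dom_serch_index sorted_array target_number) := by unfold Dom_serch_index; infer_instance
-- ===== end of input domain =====

-- B replaces A's slice-based binary search (which copies both the array and an index list
-- every step, O(n) total) with a two-pointer lo/hi binary search, O(log n); same midpoint
-- formula, hence the same probe sequence and the same result on every input.

-- ===== PORT A =====
-- A's while-loop after the i = 0 initialisation: state = (search_array, search_idx).
-- int(len(a)/2) = a.length / 2 (Nat floor division; exact since the length is nonnegative).
-- search_array[middle_idx] and search_idx[middle_idx] are always in range in Python
-- (middle_idx < length, and search_idx has the same length as search_array throughout),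
-- so pyGetD with a dummy default is exact here.
def serchLoop (search_array search_idx : List Int) (target_number : Int) : Int :=
  if _h : search_array = [] then -1
  else
    let middle_idx : Nat := search_array.length / 2
    if PySem.List.pyGetD search_array (middle_idx : Int) 0 = target_number then
      PySem.List.pyGetD search_idx (middle_idx : Int) 0
    else if PySem.List.pyGetD search_array (middle_idx : Int) 0 > target_number then
      serchLoop (PySem.List.slice search_array none (some (middle_idx : Int)))
                (PySem.List.slice search_idx none (some (middle_idx : Int))) target_number
    else
      serchLoop (PySem.List.slice search_array (some ((middle_idx : Int) + 1)) none)
                (PySem.List.slice search_idx (some ((middle_idx : Int) + 1)) none) target_number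
termination_by search_array.length
decreasing_by
  · rw [PySem.List.slice_to_natCast]
    have : 0 < search_array.length := List.length_pos_of_ne_nil _h
    simp only [List.length_take]
    omega
  · have h1 : ((search_array.length / 2 : Nat) : Int) + 1 = (((search_array.length / 2 + 1 : Nat)) : Int) := by push_cast; ring
    rw [h1, PySem.List.slice_from_natCast]
    have : 0 < search_array.length := List.length_pos_of_ne_nil _h
    simp only [List.length_drop]
    omega

def serch_index (sorted_array : List Int) (target_number : Int) : Int :=
  serchLoop sorted_array (PySem.List.pyRange 0 (sorted_array.length : Int) 1) target_number

-- ===== PORT B =====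
-- Source B's while-loop; lo and hi stay in [0, len] so Nat carries them exactly, and
-- sorted_array[mid] is always in range (mid < hi ≤ len), so getD is exact.
def bsearchLoop (sorted_array : List Int) (target_number : Int) (lo hi : Nat) : Int :=
  if _h : lo < hi then
    let mid : Nat := (lo + hi) / 2
    let v := sorted_array.getD mid 0
    if v = target_number then (mid : Int)
    else if v > target_number then bsearchLoop sorted_array target_number lo mid
    else bsearchLoop sorted_array target_number (mid + 1) hi
  else -1
termination_by hi - lo
decreasing_by
  · omega
  · omega

def serch_index_alt (sorted_array : List Int) (target_number : Int) : Int :=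
  bsearchLoop sorted_array target_number 0 sorted_array.length

-- ===== PRECONDITION & SPEC =====
def Spec_serch_index (sorted_array : List Int) (target_number : Int) (out : Int) : Prop := out = serch_index_alt sorted_array target_number
instance (sorted_array : List Int) (target_number : Int) (out : Int) : Decidable (Spec_serch_index sorted_array target_number out) := by unfold Spec_serch_index; infer_instance

-- ===== CLAIM (what is proved, stated in full; the proofs are below) =====
def Claim_equal_serch_index : Prop := ∀ (sorted_array : List Int) (target_number : Int), Dom_serch_index sorted_array target_number → Spec_serch_index sorted_array target_number (serch_index sorted_array target_number)

-- ===== LEMMAS AND PROOFS =====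

-- The loop invariant: A's state is the slice arr[lo:hi] together with the index list
-- pyRange lo hi, and on that state A's loop computes exactly B's loop on (lo, hi).
theorem serchLoop_eq_bsearchLoop (arr : List Int) (t : Int) :
    ∀ (n lo hi : Nat), hi - lo ≤ n → lo ≤ hi → hi ≤ arr.length →
      serchLoop ((arr.drop lo).take (hi - lo)) (PySem.List.pyRange (lo : Int) (hi : Int) 1) t
        = bsearchLoop arr t lo hi := by
  intro n
  induction n with
  | zero =>
    intro lo hi hd hle hhi
    have h0 : hi = lo := by omega
    subst h0
    rw [serchLoop, bsearchLoop]
    simp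
  | succ n ih =>
  intro lo hi hd hle hhi
  set sub := (arr.drop lo).take (hi - lo) with hsub
  have hsublen : sub.length = hi - lo := by
    simp [hsub, List.length_take, List.length_drop]; omega
  by_cases hempty : lo < hi
  · -- nonempty slice
    have hne : sub ≠ [] := by
      intro h0; rw [h0] at hsublen; simp at hsublen; omega
    have hm : sub.length / 2 = (hi - lo) / 2 := by rw [hsublen]
    set m : Nat := (hi - lo) / 2 with hmdef
    have hmlt : m < hi - lo := by omega
    have hmid : (lo + hi) / 2 = lo + m := by omega
    -- the probed value is the same on both sides
    have hval : PySem.List.pyGetD sub (m : Int) 0 = arr.getD ((lo + hi) / 2) 0 := by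
      rw [PySem.List.pyGetD_natCast, hmid]
      rw [List.getD_eq_getElem?_getD, List.getD_eq_getElem?_getD, hsub]
      rw [List.getElem?_take_of_lt hmlt, List.getElem?_drop]
    -- the returned index is the same on both sides
    have hidx : PySem.List.pyGetD (PySem.List.pyRange (lo : Int) (hi : Int) 1) (m : Int) 0
        = (((lo + hi) / 2 : Nat) : Int) := by
      rw [PySem.List.pyGetD_natCast, List.getD_eq_getElem?_getD,
        PySem.List.getElem?_pyRange_one]
      have hc : m < ((hi : Int) - (lo : Int)).toNat := by omega
      rw [if_pos hc]
      simp [hmid]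
    -- the two restricted slices are the invariant for (lo, lo+m) resp. (lo+m+1, hi)
    have hsubtake : PySem.List.slice sub none (some ((m : Nat) : Int))
        = (arr.drop lo).take ((lo + m) - lo) := by
      rw [PySem.List.slice_to_natCast, hsub, List.take_take]
      congr 1; omega
    have hrangesplit1 : PySem.List.pyRange (lo : Int) (hi : Int) 1
        = PySem.List.pyRange (lo : Int) ((lo + m : Nat) : Int) 1
          ++ PySem.List.pyRange ((lo + m : Nat) : Int) (hi : Int) 1 := by
      apply PySem.List.pyRange_one_append <;> (push_cast; omega)
    have hlen1 : (PySem.List.pyRange (lo : Int) ((lo + m : Nat) : Int) 1).length = m := by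
      rw [PySem.List.length_pyRange_one]; push_cast; omega
    have hidxtake' : PySem.List.slice (PySem.List.pyRange (lo : Int) (hi : Int) 1) none (some ((m : Nat) : Int))
        = PySem.List.pyRange (lo : Int) ((lo + m : Nat) : Int) 1 := by
      rw [PySem.List.slice_to_natCast, hrangesplit1, List.take_append, hlen1]
      simp
    have hrangesplit2 : PySem.List.pyRange (lo : Int) (hi : Int) 1
        = PySem.List.pyRange (lo : Int) ((lo + m + 1 : Nat) : Int) 1
          ++ PySem.List.pyRange ((lo + m + 1 : Nat) : Int) (hi : Int) 1 := by
      apply PySem.List.pyRange_one_append <;> (push_cast; omega)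
    have hlen2 : (PySem.List.pyRange (lo : Int) ((lo + m + 1 : Nat) : Int) 1).length = m + 1 := by
      rw [PySem.List.length_pyRange_one]; push_cast; omega
    have hcast1 : ((m : Nat) : Int) + 1 = ((m + 1 : Nat) : Int) := by push_cast; ring
    have hidxdrop : PySem.List.slice (PySem.List.pyRange (lo : Int) (hi : Int) 1) (some (((m : Nat) : Int) + 1)) none
        = PySem.List.pyRange ((lo + m + 1 : Nat) : Int) (hi : Int) 1 := by
      rw [hcast1, PySem.List.slice_from_natCast, hrangesplit2, List.drop_append, hlen2]
      simp
      omega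
    have hsubdrop : PySem.List.slice sub (some (((m : Nat) : Int) + 1)) none
        = (arr.drop (lo + m + 1)).take (hi - (lo + m + 1)) := by
      rw [hcast1, PySem.List.slice_from_natCast, hsub, List.drop_take, List.drop_drop]
      congr 1
      omega
    rw [serchLoop, bsearchLoop]
    rw [dif_neg hne, dif_pos hempty]
    simp only [hsublen, hval, ← hmdef]
    split_ifs with h1 h2
    · exact hidx
    · rw [hsubtake, hidxtake', ih lo (lo + m) (by omega) (by omega) (by omega)]
      simp [hmid]
    · rw [hsubdrop, hidxdrop]
      have := ih (lo + m + 1) hi (by omega) (by omega) (by omega)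
      rw [this]
      simp [hmid]
  · -- empty slice: both return -1
    have h0 : hi = lo := by omega
    have : sub = [] := by
      apply List.eq_nil_of_length_eq_zero; omega
    rw [this, serchLoop, bsearchLoop]
    simp [hempty]

-- ===== VERDICT (by name: the statement is the Claim_ definition above) =====
theorem serch_index_spec : Claim_equal_serch_index := by
  intro arr t _
  unfold Spec_serch_index serch_index serch_index_alt
  have := serchLoop_eq_bsearchLoop arr t arr.length 0 arr.length (by omega) (Nat.zero_le _) le_rfl
  simpa using this
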